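-- pv_equiv track=rewrite | github.com/visdesignlab/cell-growth-util | util_tracks.py | buildRangesFromSet
-- ===== SOURCE A (Python) =====
-- import os, io, math, random
-- from typing import Dict, Tuple, List, Union, Set
--
-- def buildRangesFromSet(numberSet: Set[int]) -> List[List[int]]:
--     sortedList = list(numberSet)
--     sortedList.sort()
--
--     rangeListFlat = []
--     for i, val in enumerate(sortedList):
--         if i == 0:
--             prevVal = -math.inf
--         else:
--             prevVal = sortedList[i-1]
--
--         if i == len(sortedList) - 1:
--             nextVal = math.inf
--         else:
--             nextVal = sortedList[i+1]
--
--         # it is intended that val could be added twice here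
--         if val - prevVal > 1:
--             rangeListFlat.append(val)
--         if nextVal - val > 1:
--             rangeListFlat.append(val)
--
--     nestedArray = [[rangeListFlat[j], rangeListFlat[j+1]] for j in range(0, len(rangeListFlat), 2)]
--
--     return nestedArray
-- ===== SOURCE B (Python) =====
-- def buildRangesFromSet(numberSet):
--     sortedList = sorted(numberSet)
--     result = []
--     if not sortedList:
--         return result
--     start = prev = sortedList[0]
--     for v in sortedList[1:]:
--         if v - prev > 1:
--             result.append([start, prev])
--             start = v
--         prev = v
--     result.append([start, prev])
--     return result
-- ===== Notes on version B (the rewrite author's own statement) =====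
-- stated objective: simpler
-- what changed: Instead of building a flat boundary list (via index lookups with +/-inf sentinels) and then re-pairing it with a range-step-2 comprehension, B walks the sorted values once keeping the current run's start and previous value, emitting each [start, prev] run directly.
import Mathlib
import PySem

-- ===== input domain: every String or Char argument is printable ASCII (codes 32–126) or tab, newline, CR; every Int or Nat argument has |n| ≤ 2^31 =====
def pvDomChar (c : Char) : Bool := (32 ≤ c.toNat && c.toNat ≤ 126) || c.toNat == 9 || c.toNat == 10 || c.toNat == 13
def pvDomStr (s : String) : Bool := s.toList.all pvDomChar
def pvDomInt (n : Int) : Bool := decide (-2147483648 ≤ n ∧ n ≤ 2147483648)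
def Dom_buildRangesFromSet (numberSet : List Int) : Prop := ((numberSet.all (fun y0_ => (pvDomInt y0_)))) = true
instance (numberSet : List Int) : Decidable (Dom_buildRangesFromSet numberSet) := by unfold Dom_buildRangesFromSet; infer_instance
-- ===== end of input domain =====

-- B replaces A's flat boundary list (index lookups with ±inf sentinels, then a step-2 re-pairing pass)
-- by a single walk over the sorted values that keeps the current run's start/prev and emits runs directly (simpler).


-- ===== PORT A =====
-- body of A's 'for i, val in enumerate(sortedList)' loop; prevVal = -inf at i = 0 (then
-- 'val - prevVal > 1' is always true) and nextVal = +inf at i = len-1 (then 'nextVal - val > 1'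
-- is always true): the float sentinels only ever make those comparisons true, ported as the
-- corresponding branch being true.
def flatStep (s : List Int) (acc : List Int) (iv : Int × Int) : List Int :=
  let i := iv.1
  let val := iv.2
  let gapBefore : Bool := if i = 0 then true else decide (val - (PySem.List.pyGetD s (i-1) 0) > 1)
  let gapAfter : Bool := if i = (s.length : Int) - 1 then true else decide ((PySem.List.pyGetD s (i+1) 0) - val > 1)
  let acc1 := if gapBefore then acc ++ [val] else acc
  if gapAfter then acc1 ++ [val] else acc1

def buildRangesFromSet (numberSet : List Int) : List (List Int) :=
  let sortedList := PySem.List.sorted numberSet (fun x => x) false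
  let rangeListFlat := (PySem.List.enumerate sortedList).foldl (flatStep sortedList) []
  (PySem.List.pyRange 0 (rangeListFlat.length : Int) 2).map
    (fun j => [PySem.List.pyGetD rangeListFlat j 0, PySem.List.pyGetD rangeListFlat (j+1) 0])

-- ===== PORT B =====
def altLoop (acc : List (List Int)) (start prev : Int) : List Int → List (List Int)
  | [] => acc ++ [[start, prev]]
  | v :: rest =>
    if v - prev > 1 then altLoop (acc ++ [[start, prev]]) v v rest
    else altLoop acc start v rest

def buildRangesFromSet_alt (numberSet : List Int) : List (List Int) :=
  match PySem.List.sorted numberSet (fun x => x) false with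
  | [] => []
  | x :: rest => altLoop [] x x rest

-- ===== PRECONDITION & SPEC =====
def Spec_buildRangesFromSet (numberSet : List Int) (out : List (List Int)) : Prop := out = buildRangesFromSet_alt numberSet
instance (numberSet : List Int) (out : List (List Int)) : Decidable (Spec_buildRangesFromSet numberSet out) := by unfold Spec_buildRangesFromSet; infer_instance

-- ===== CLAIM (what is proved, stated in full; the proofs are below) =====
def Claim_equal_buildRangesFromSet : Prop := ∀ (numberSet : List Int), Dom_buildRangesFromSet numberSet → Spec_buildRangesFromSet numberSet (buildRangesFromSet numberSet)

-- ===== LEMMAS AND PROOFS =====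

-- proof-side characterisation of A's flat boundary list on the suffix starting at cur,
-- given the value prev just before cur
def F (prev cur : Int) : List Int → List Int
  | [] => (if cur - prev > 1 then [cur] else []) ++ [cur]
  | v :: t => (if cur - prev > 1 then [cur] else []) ++ (if v - cur > 1 then [cur] else []) ++ F cur v t

-- the same list regrouped: boundaries paired run-by-run
def K (cur : Int) : List Int → List Int
  | [] => [cur]
  | v :: t => if v - cur > 1 then cur :: v :: K v t else K v t

-- the step-2 pairing pass of A, in Nat form
def pairN (l : List Int) : List (List Int) :=
  (List.range ((l.length + 1) / 2)).map (fun k => [l.getD (2*k) 0, l.getD (2*k+1) 0])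

lemma pyGetD_append_mid (p l : List Int) (x : Int) :
    PySem.List.pyGetD (p ++ x :: l) (p.length : Int) 0 = x := by
  rw [PySem.List.pyGetD_natCast]
  simp [List.getD_eq_getElem?_getD]

lemma foldl_flatStep : ∀ (t p : List Int) (prevv cur : Int) (acc : List Int),
    (PySem.List.enumerate (cur :: t) ((p.length : Int) + 1)).foldl (flatStep (p ++ prevv :: cur :: t)) acc
    = acc ++ F prevv cur t := by
  intro t
  induction t with
  | nil =>
      intro p prevv cur acc
      simp only [PySem.List.enumerate_cons, PySem.List.enumerate_nil, List.foldl_cons, List.foldl_nil]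
      show flatStep (p ++ prevv :: [cur]) acc ((p.length : Int) + 1, cur) = acc ++ F prevv cur []
      unfold flatStep F
      have h0 : ¬ ((p.length : Int) + 1 = 0) := by omega
      have hlast : ((p.length : Int) + 1) = (((p ++ prevv :: [cur]).length : Int) - 1) := by
        simp; omega
      have hprev : PySem.List.pyGetD (p ++ prevv :: [cur]) ((p.length : Int) + 1 - 1) 0 = prevv := by
        rw [show ((p.length : Int) + 1 - 1) = (p.length : Int) by ring]
        exact pyGetD_append_mid p [cur] prevv
      simp only [hprev]
      rw [if_neg h0, if_pos hlast]
      split_ifs <;> simp_all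
  | cons v t' ih =>
      intro p prevv cur acc
      rw [PySem.List.enumerate_cons, List.foldl_cons]
      have hs : p ++ prevv :: cur :: v :: t' = (p ++ [prevv]) ++ cur :: v :: t' := by simp
      have hidx : (p.length : Int) + 1 + 1 = (((p ++ [prevv]).length : Int) + 1) := by simp
      rw [hidx, hs, ih (p ++ [prevv]) cur v]
      have hstep : flatStep ((p ++ [prevv]) ++ cur :: v :: t') acc ((p.length : Int) + 1, cur)
          = acc ++ (if cur - prevv > 1 then [cur] else []) ++ (if v - cur > 1 then [cur] else []) := by
        unfold flatStep
        have h0 : ¬ ((p.length : Int) + 1 = 0) := by omega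
        have hlast : ¬ ((p.length : Int) + 1 = ((((p ++ [prevv]) ++ cur :: v :: t').length : Int) - 1)) := by
          simp; omega
        have hprev : PySem.List.pyGetD ((p ++ [prevv]) ++ cur :: v :: t') ((p.length : Int) + 1 - 1) 0 = prevv := by
          rw [show ((p.length : Int) + 1 - 1) = (p.length : Int) by ring,
              show (p ++ [prevv]) ++ cur :: v :: t' = p ++ prevv :: (cur :: v :: t') by simp]
          exact pyGetD_append_mid p _ prevv
        have hnext : PySem.List.pyGetD ((p ++ [prevv]) ++ cur :: v :: t') ((p.length : Int) + 1 + 1) 0 = v := by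
          have e : ((p.length : Int) + 1 + 1) = (((p ++ [prevv, cur]).length : Int)) := by
            simp; ring
          rw [e, show (p ++ [prevv]) ++ cur :: v :: t' = (p ++ [prevv, cur]) ++ v :: t' by simp]
          exact pyGetD_append_mid _ _ v
        simp only [hprev, hnext]
        rw [if_neg h0, if_neg hlast]
        split_ifs <;> simp_all
      rw [hstep, show F prevv cur (v :: t')
        = (if cur - prevv > 1 then [cur] else []) ++ (if v - cur > 1 then [cur] else []) ++ F cur v t' from rfl]
      simp

lemma F_eq_K (t : List Int) : ∀ (prev cur : Int),
    F prev cur t = (if cur - prev > 1 then [cur] else []) ++ K cur t := by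
  induction t with
  | nil => intro prev cur; simp [F, K]
  | cons v t ih =>
      intro prev cur
      rw [show F prev cur (v :: t)
            = (if cur - prev > 1 then [cur] else []) ++ (if v - cur > 1 then [cur] else [])
              ++ F cur v t from rfl, ih,
          show K cur (v :: t) = if v - cur > 1 then cur :: v :: K v t else K v t from rfl]
      by_cases hg : v - cur > 1 <;> simp [hg]

lemma flat_eq_K (x : Int) (rest : List Int) :
    (PySem.List.enumerate (x :: rest) 0).foldl (flatStep (x :: rest)) []
    = x :: K x rest := by
  cases rest with
  | nil =>
      simp only [PySem.List.enumerate_cons, PySem.List.enumerate_nil, List.foldl_cons, List.foldl_nil]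
      show flatStep [x] [] (0, x) = x :: K x []
      unfold flatStep
      dsimp only
      rw [if_pos rfl, if_pos (by simp : (0:Int) = (([x] : List Int).length : Int) - 1)]
      simp [K]
  | cons v t =>
      rw [PySem.List.enumerate_cons, List.foldl_cons,
          show (0:Int) + 1 = (([] : List Int).length : Int) + 1 by simp,
          show (x :: v :: t) = ([] : List Int) ++ x :: v :: t from rfl,
          foldl_flatStep t [] x v]
      have hacc : flatStep (([] : List Int) ++ x :: v :: t) [] (0, x)
          = [x] ++ (if v - x > 1 then [x] else []) := by
        unfold flatStep
        dsimp only [List.nil_append]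
        have hlast : ¬ ((0:Int) = (((x :: v :: t) : List Int).length : Int) - 1) := by
          simp; omega
        have hnext : PySem.List.pyGetD (x :: v :: t) ((0:Int) + 1) 0 = v := by
          rw [show ((0:Int) + 1) = (([x] : List Int).length : Int) by simp]
          exact pyGetD_append_mid [x] t v
        simp only [hnext]
        rw [if_neg hlast]
        split_ifs <;> simp_all
      rw [hacc, F_eq_K t x v,
          show K x (v :: t) = if v - x > 1 then x :: v :: K v t else K v t from rfl]
      split_ifs <;> simp

lemma mapPair_eq_pairN (l : List Int) :
    (PySem.List.pyRange 0 (l.length : Int) 2).map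
      (fun j => [PySem.List.pyGetD l j 0, PySem.List.pyGetD l (j+1) 0]) = pairN l := by
  rw [PySem.List.pyRange_of_pos 0 (l.length : Int) (by norm_num)]
  unfold pairN
  have hcnt : (if (0:Int) < (l.length : Int) then (((l.length : Int) - 0 + 2 - 1) / 2).toNat else 0)
      = (l.length + 1) / 2 := by
    split_ifs with h <;> omega
  rw [hcnt, List.map_map]
  apply List.map_congr_left
  intro k _
  simp only [Function.comp_def]
  have hA := PySem.List.pyGetD_natCast (xs := l) (n := 2*k) (d := (0:Int))
  have hB := PySem.List.pyGetD_natCast (xs := l) (n := 2*k+1) (d := (0:Int))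
  push_cast at hA hB
  simp only [show (0:Int) + 2 * (k:Int) = 2 * (k:Int) by ring, hA, hB]

lemma pairN_cons_cons (a b : Int) (t : List Int) : pairN (a :: b :: t) = [a, b] :: pairN t := by
  unfold pairN
  have h : ((a :: b :: t).length + 1) / 2 = (t.length + 1) / 2 + 1 := by
    simp only [List.length_cons]; omega
  rw [h, List.range_succ_eq_map]
  simp only [List.map_cons, List.map_map, Function.comp_def]
  congr 1

lemma altLoop_acc : ∀ (rest : List Int) (acc : List (List Int)) (start cur : Int),
    altLoop acc start cur rest = acc ++ altLoop [] start cur rest := by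
  intro rest
  induction rest with
  | nil => intro acc s c; simp [altLoop]
  | cons v t ih =>
      intro acc s c
      have hstep : ∀ (a : List (List Int)), altLoop a s c (v :: t)
          = if v - c > 1 then altLoop (a ++ [[s, c]]) v v t else altLoop a s v t := fun a => rfl
      rw [hstep, hstep]
      split_ifs
      · rw [ih]; simp [ih [[s, c]] v v]
      · exact ih acc s v

lemma pairN_K : ∀ (rest : List Int) (start cur : Int),
    pairN (start :: K cur rest) = altLoop [] start cur rest := by
  intro rest
  induction rest with
  | nil => intro s c; show pairN [s, c] = [[s, c]]; simp [pairN]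
  | cons v t ih =>
      intro s c
      have hstep : altLoop [] s c (v :: t)
          = if v - c > 1 then altLoop [[s, c]] v v t else altLoop [] s v t := by
        show (if v - c > 1 then altLoop ([] ++ [[s, c]]) v v t else altLoop [] s v t) = _
        simp
      have hK : K c (v :: t) = if v - c > 1 then c :: v :: K v t else K v t := rfl
      rw [hstep, hK]
      split_ifs with hg
      · rw [pairN_cons_cons, ih, altLoop_acc t [[s, c]] v v]; rfl
      · exact ih s v

-- ===== VERDICT (by name: the statement is the Claim_ definition above) =====
theorem buildRangesFromSet_spec : Claim_equal_buildRangesFromSet := by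
  intro ns _
  unfold Spec_buildRangesFromSet buildRangesFromSet buildRangesFromSet_alt
  cases h : PySem.List.sorted ns (fun x => x) false with
  | nil => simp [PySem.List.enumerate_nil, PySem.List.pyRange]
  | cons x rest =>
      simp only []
      rw [flat_eq_K, mapPair_eq_pairN]
      cases rest with
      | nil => exact pairN_K [] x x
      | cons v t =>
          rw [show K x (v :: t) = if v - x > 1 then x :: v :: K v t else K v t from rfl]
          split_ifs with hg
          · rw [pairN_cons_cons, pairN_K, altLoop_acc (v :: t) [] x x]
            simp [altLoop, hg, altLoop_acc t [[x, x]] v v]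
          · rw [pairN_K, show altLoop [] x x (v :: t) = altLoop [] x v t by simp [altLoop, hg]]
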